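-- pv_equiv track=rewrite | github.com/hema312006/Machine_Learning_22AIE213 | lab_2/question7.py | binary_counts
-- ===== SOURCE A (Python) =====
-- def binary_counts(a, b):
--     one_one = one_zero = zero_one = zero_zero = 0
--     for k in range(len(a)):
--         if a[k] == 1 and b[k] == 1:
--             one_one += 1
--         elif a[k] == 1 and b[k] == 0:
--             one_zero += 1
--         elif a[k] == 0 and b[k] == 1:
--             zero_one += 1
--         else:
--             zero_zero += 1
--     return one_one, one_zero, zero_one, zero_zero
-- ===== SOURCE B (Python) =====
-- def binary_counts(a, b):
--     pairs = [(a[k], b[k]) for k in range(len(a))]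
--     one_one = pairs.count((1, 1))
--     one_zero = pairs.count((1, 0))
--     zero_one = pairs.count((0, 1))
--     return one_one, one_zero, zero_one, len(a) - one_one - one_zero - zero_one
-- ===== Notes on version B (the rewrite author's own statement) =====
-- stated objective: alternative
-- what changed: Replaces the single stateful pass with an if/elif chain over four counters by staged passes: materialise the pair sequence once, count each of the three explicit patterns with separate .count scans, and derive the catch-all fourth count as len(a) minus the other three.
-- outside the precondition, e.g. on binary_counts([5], []): A returns (0, 0, 0, 1), B raises IndexError
import Mathlib
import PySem

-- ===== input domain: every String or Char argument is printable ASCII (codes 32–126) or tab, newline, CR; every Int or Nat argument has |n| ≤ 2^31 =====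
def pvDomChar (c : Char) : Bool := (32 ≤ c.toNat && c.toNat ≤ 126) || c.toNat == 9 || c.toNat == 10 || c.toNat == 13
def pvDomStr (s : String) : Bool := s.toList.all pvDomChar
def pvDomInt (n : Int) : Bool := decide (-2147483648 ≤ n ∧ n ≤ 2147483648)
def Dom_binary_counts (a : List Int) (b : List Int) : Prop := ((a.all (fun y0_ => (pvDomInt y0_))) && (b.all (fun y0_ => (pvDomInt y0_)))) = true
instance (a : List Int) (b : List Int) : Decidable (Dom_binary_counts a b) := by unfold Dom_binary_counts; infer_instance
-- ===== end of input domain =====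

-- B replaces A's single stateful if/elif pass by staged passes: build the pair list once,
-- count the three explicit patterns with separate count scans, derive the fourth arithmetically (alternative, same cost).


-- ===== PORT A =====
-- A's loop body: the if/elif chain over the four counters
def pvStepA (a : List Int) (b : List Int) (s : Int × Int × Int × Int) (k : Int) : Int × Int × Int × Int :=
  let av := PySem.List.pyGetD a k 0
  let bv := PySem.List.pyGetD b k 0
  if av = 1 ∧ bv = 1 then (s.1 + 1, s.2.1, s.2.2.1, s.2.2.2)
  else if av = 1 ∧ bv = 0 then (s.1, s.2.1 + 1, s.2.2.1, s.2.2.2)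
  else if av = 0 ∧ bv = 1 then (s.1, s.2.1, s.2.2.1 + 1, s.2.2.2)
  else (s.1, s.2.1, s.2.2.1, s.2.2.2 + 1)

def binary_counts (a : List Int) (b : List Int) : Int × Int × Int × Int :=
  (PySem.List.pyRange 0 (a.length : Int) 1).foldl (pvStepA a b) (0, 0, 0, 0)

-- ===== PORT B =====
-- pairs = [(a[k], b[k]) for k in range(len(a))]
def pvPairs (a : List Int) (b : List Int) (n : Int) : List (Int × Int) :=
  (PySem.List.pyRange 0 n 1).map (fun k => (PySem.List.pyGetD a k 0, PySem.List.pyGetD b k 0))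

def binary_counts_alt (a : List Int) (b : List Int) : Int × Int × Int × Int :=
  let pairs := pvPairs a b (a.length : Int)
  let one_one := PySem.List.count pairs (1, 1)
  let one_zero := PySem.List.count pairs (1, 0)
  let zero_one := PySem.List.count pairs (0, 1)
  (one_one, one_zero, zero_one, (a.length : Int) - one_one - one_zero - zero_one)

-- ===== PRECONDITION & SPEC =====
-- Pre_ excludes inputs where b is shorter than a: Python A raises IndexError there except in the
-- accidental case that every overhanging a[k] is non-binary (short-circuit skips b[k]), where A
-- still returns; B naturally indexes b[k] for every k and raises IndexError on all such inputs.
def Pre_binary_counts (a : List Int) (b : List Int) : Prop := a.length ≤ b.length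
instance (a : List Int) (b : List Int) : Decidable (Pre_binary_counts a b) := by unfold Pre_binary_counts; infer_instance
def pvWitness_binary_counts : List Int × List Int := ([1, 0, 2, 1], [1, 1, 0, 0])
def Spec_binary_counts (a : List Int) (b : List Int) (out : Int × Int × Int × Int) : Prop := out = binary_counts_alt a b
instance (a : List Int) (b : List Int) (out : Int × Int × Int × Int) : Decidable (Spec_binary_counts a b out) := by unfold Spec_binary_counts; infer_instance

-- ===== CLAIM (what is proved, stated in full; the proofs are below) =====
def Claim_equal_binary_counts : Prop := ∀ (a : List Int) (b : List Int), Dom_binary_counts a b → Pre_binary_counts a b → Spec_binary_counts a b (binary_counts a b)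

-- ===== LEMMAS AND PROOFS =====

-- Loop invariant: after processing range(0, n), A's first three counters are the pattern counts
-- of the pair list over the same range, and A's four counters sum to n.
lemma binary_counts_loop_inv (a b : List Int) (n : Nat) :
    ((PySem.List.pyRange 0 (n : Int) 1).foldl (pvStepA a b) (0, 0, 0, 0)).1
        = PySem.List.count (pvPairs a b (n : Int)) (1, 1) ∧
    ((PySem.List.pyRange 0 (n : Int) 1).foldl (pvStepA a b) (0, 0, 0, 0)).2.1
        = PySem.List.count (pvPairs a b (n : Int)) (1, 0) ∧
    ((PySem.List.pyRange 0 (n : Int) 1).foldl (pvStepA a b) (0, 0, 0, 0)).2.2.1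
        = PySem.List.count (pvPairs a b (n : Int)) (0, 1) ∧
    ((PySem.List.pyRange 0 (n : Int) 1).foldl (pvStepA a b) (0, 0, 0, 0)).1
      + ((PySem.List.pyRange 0 (n : Int) 1).foldl (pvStepA a b) (0, 0, 0, 0)).2.1
      + ((PySem.List.pyRange 0 (n : Int) 1).foldl (pvStepA a b) (0, 0, 0, 0)).2.2.1
      + ((PySem.List.pyRange 0 (n : Int) 1).foldl (pvStepA a b) (0, 0, 0, 0)).2.2.2 = (n : Int) := by
  induction n with
  | zero => simp [pvPairs, PySem.List.count]
  | succ m ih =>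
    have hsplit : PySem.List.pyRange 0 ((m + 1 : Nat) : Int) 1
        = PySem.List.pyRange 0 (m : Int) 1 ++ [(m : Int)] := by
      push_cast
      exact PySem.List.pyRange_one_succ_right (by positivity)
    simp only [pvPairs, hsplit, List.foldl_append, List.foldl_cons, List.foldl_nil,
      List.map_append, List.map_cons, List.map_nil, PySem.List.count, List.count_append]
    obtain ⟨h11, h10, h01, hsum⟩ := ih
    simp only [pvPairs, PySem.List.count] at h11 h10 h01
    generalize hs : (PySem.List.pyRange 0 (m : Int) 1).foldl (pvStepA a b) ((0, 0, 0, 0) : Int × Int × Int × Int) = s at *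
    obtain ⟨oo, oz, zo, zz⟩ := s
    unfold pvStepA
    by_cases hA : PySem.List.pyGetD a (m : Int) 0 = 1 ∧ PySem.List.pyGetD b (m : Int) 0 = 1
    · obtain ⟨ha, hb⟩ := hA
      simp [ha, hb] at h11 h10 h01 hsum ⊢
      omega
    · by_cases hB : PySem.List.pyGetD a (m : Int) 0 = 1 ∧ PySem.List.pyGetD b (m : Int) 0 = 0
      · obtain ⟨ha, hb⟩ := hB
        simp [ha, hb] at h11 h10 h01 hsum ⊢
        omega
      · by_cases hC : PySem.List.pyGetD a (m : Int) 0 = 0 ∧ PySem.List.pyGetD b (m : Int) 0 = 1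
        · obtain ⟨ha, hb⟩ := hC
          simp [ha, hb] at h11 h10 h01 hsum ⊢
          omega
        · rw [if_neg hA, if_neg hB, if_neg hC]
          simp [PySem.List.pyGetD] at hA hB hC
          simp [List.count_cons] at h11 h10 h01 hsum ⊢
          omega

-- ===== VERDICT (by name: the statement is the Claim_ definition above) =====
theorem binary_counts_spec : Claim_equal_binary_counts := by
  intro a b _ _
  obtain ⟨h11, h10, h01, hsum⟩ := binary_counts_loop_inv a b a.length
  unfold Spec_binary_counts
  simp only [binary_counts, binary_counts_alt]
  rw [← h11, ← h10, ← h01]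
  generalize hg : (PySem.List.pyRange 0 (a.length : Int) 1).foldl (pvStepA a b) ((0, 0, 0, 0) : Int × Int × Int × Int) = s at hsum ⊢
  obtain ⟨oo, oz, zo, zz⟩ := s
  simp only [Prod.ext_iff] at hsum ⊢
  refine ⟨trivial, trivial, trivial, ?_⟩
  omega
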